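-- pv_equiv track=rewrite | github.com/Di-Chai/5002Assignment2 | dataSet.py | reshape_list
-- ===== SOURCE A (Python) =====
-- def reshape_list(rawData, newRowNum, newColNum):
--     if rawData.__len__() != (newRowNum * newColNum):
--         return None
--     else:
--         resultList = []
--         for i in range(0, newRowNum):
--             resultList.append(rawData[i*newColNum:i*newColNum+newColNum])
--         return resultList
-- ===== SOURCE B (Python) =====
-- def reshape_list(rawData, newRowNum, newColNum):
--     if len(rawData) != newRowNum * newColNum:
--         return None
--     it = iter(rawData)
--     return [[next(it) for _ in range(newColNum)] for _ in range(newRowNum)]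
-- ===== Notes on version B (the rewrite author's own statement) =====
-- stated objective: alternative
-- what changed: Rows are pulled element-by-element from a single iterator (newColNum elements per row) instead of being computed as index-arithmetic slices rawData[i*c:i*c+c].
import Mathlib
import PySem

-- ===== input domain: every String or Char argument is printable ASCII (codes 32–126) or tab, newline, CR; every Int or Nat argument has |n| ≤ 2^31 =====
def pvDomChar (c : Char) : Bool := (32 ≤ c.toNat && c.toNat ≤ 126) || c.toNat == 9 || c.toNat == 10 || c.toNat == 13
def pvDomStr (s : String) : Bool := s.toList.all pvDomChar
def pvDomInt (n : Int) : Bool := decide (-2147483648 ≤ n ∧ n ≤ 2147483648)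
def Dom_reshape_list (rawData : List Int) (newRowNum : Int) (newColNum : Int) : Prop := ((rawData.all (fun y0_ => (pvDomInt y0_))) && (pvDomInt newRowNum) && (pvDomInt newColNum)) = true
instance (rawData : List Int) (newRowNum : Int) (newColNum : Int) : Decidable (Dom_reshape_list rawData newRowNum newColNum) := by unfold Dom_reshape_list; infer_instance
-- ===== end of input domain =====

-- B reshapes by pulling newColNum elements per row from one running iterator instead of computing index-arithmetic slices (alternative decomposition, same cost).


-- ===== PORT A =====
-- literal port: length guard, then for i in range(0, newRowNum): append rawData[i*c : i*c+c]
def reshape_list (rawData : List Int) (newRowNum : Int) (newColNum : Int) : Option (List (List Int)) :=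
  if (rawData.length : Int) ≠ newRowNum * newColNum then
    none
  else
    some ((PySem.List.pyRange 0 newRowNum 1).foldl
      (fun resultList i =>
        resultList ++ [PySem.List.slice rawData (some (i * newColNum)) (some (i * newColNum + newColNum))])
      [])

-- ===== PORT B =====
-- the iterator: 'rows rem r c' pulls c elements per row from the remaining stream rem, r times
def rows (rem : List Int) (r : Nat) (c : Nat) : List (List Int) :=
  match r with
  | 0 => []
  | r' + 1 => rem.take c :: rows (rem.drop c) r' c

def reshape_list_alt (rawData : List Int) (newRowNum : Int) (newColNum : Int) : Option (List (List Int)) :=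
  if (rawData.length : Int) ≠ newRowNum * newColNum then
    none
  else
    some (rows rawData newRowNum.toNat newColNum.toNat)

-- ===== PRECONDITION & SPEC =====
def Spec_reshape_list (rawData : List Int) (newRowNum : Int) (newColNum : Int) (out : Option (List (List Int))) : Prop := out = reshape_list_alt rawData newRowNum newColNum
instance (rawData : List Int) (newRowNum : Int) (newColNum : Int) (out : Option (List (List Int))) : Decidable (Spec_reshape_list rawData newRowNum newColNum out) := by unfold Spec_reshape_list; infer_instance

-- ===== CLAIM (what is proved, stated in full; the proofs are below) =====
def Claim_equal_reshape_list : Prop := ∀ (rawData : List Int) (newRowNum : Int) (newColNum : Int), Dom_reshape_list rawData newRowNum newColNum → Spec_reshape_list rawData newRowNum newColNum (reshape_list rawData newRowNum newColNum)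

-- ===== LEMMAS AND PROOFS =====

-- mapping the slice-by-index function over range n yields exactly B's iterator rows
lemma map_range_take_drop (c : Nat) : ∀ (n : Nat) (xs : List Int),
    (List.range n).map (fun k => (xs.drop (k * c)).take c) = rows xs n c := by
  intro n
  induction n with
  | zero => intro xs; simp [rows]
  | succ n ih =>
    intro xs
    rw [List.range_succ_eq_map]
    simp only [List.map_cons, List.map_map, rows, Nat.zero_mul, List.drop_zero]
    refine congrArg _ ?_
    rw [← ih (xs.drop c)]
    apply List.map_congr_left
    intro k _
    simp [List.drop_drop, Nat.succ_mul, Nat.add_comm]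

theorem reshape_list_spec : Claim_equal_reshape_list := by
  intro rawData r c _
  unfold Spec_reshape_list reshape_list reshape_list_alt
  by_cases hlen : (rawData.length : Int) ≠ r * c
  · simp [hlen]
  · push_neg at hlen
    simp only [hlen, ne_eq, not_true_eq_false, if_false, Option.some.injEq]
    rw [PySem.List.foldl_append_singleton_eq_map, List.nil_append, PySem.List.pyRange_one]
    by_cases hr : r ≤ 0
    · -- no rows: both sides are []
      have h1 : (r - 0).toNat = 0 := by omega
      have h2 : r.toNat = 0 := by omega
      simp [h2, rows]
    · push_neg at hr
      have hc : 0 ≤ c := by nlinarith [Int.natCast_nonneg rawData.length]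
      have h1 : (r - 0).toNat = r.toNat := by omega
      rw [h1, ← map_range_take_drop c.toNat r.toNat rawData, List.map_map]
      apply List.map_congr_left
      intro k _
      simp only [Function.comp]
      have : (0 : Int) + (k : Int) = (k : Int) := by ring
      rw [this]
      have hkc : (k : Int) * c = ((k * c.toNat : Nat) : Int) := by
        push_cast [Int.toNat_of_nonneg hc]; ring
      have hcc : (c : Int) = ((c.toNat : Nat) : Int) := by omega
      rw [hkc, hcc, PySem.List.slice_natCast_add, Int.toNat_natCast]
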